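-- pv_equiv track=rewrite | github.com/rangogamedev/codecks-cli | codecks_cli/planning.py | append_to_section
-- ===== SOURCE A (Python) =====
-- def append_to_section(content: str, section_header: str, bullet: str) -> str:
--     """Append a bullet to a markdown section, replacing placeholder if needed.
--
--     Looks for '## <section_header>' and adds '- <bullet>' either by replacing
--     a lone '-' placeholder or by inserting after the last existing bullet.
--     """
--     lines = content.splitlines(keepends=True)
--     section_idx = None
--     for i, line in enumerate(lines):
--         if line.strip() == f"## {section_header}":
--             section_idx = i
--             break
--     if section_idx is None:
--         return content
--
--     # Find section end (next ## heading or EOF)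
--     end_idx = len(lines)
--     for i in range(section_idx + 1, len(lines)):
--         if lines[i].startswith("## "):
--             end_idx = i
--             break
--
--     # Scan for bullets and placeholder within section
--     last_bullet_idx = None
--     placeholder_idx = None
--     for i in range(section_idx + 1, end_idx):
--         stripped = lines[i].strip()
--         if stripped == "-":
--             placeholder_idx = i
--         elif stripped.startswith("- "):
--             last_bullet_idx = i
--
--     if placeholder_idx is not None and last_bullet_idx is None:
--         # Replace lone placeholder with real content
--         lines[placeholder_idx] = f"- {bullet}\n"
--     elif last_bullet_idx is not None:
--         lines.insert(last_bullet_idx + 1, f"- {bullet}\n")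
--     else:
--         lines.insert(section_idx + 1, f"- {bullet}\n")
--
--     return "".join(lines)
-- ===== SOURCE B (Python) =====
-- def append_to_section(content: str, section_header: str, bullet: str) -> str:
--     """Append a bullet to a markdown section, replacing placeholder if needed."""
--     lines = content.splitlines(keepends=True)
--     target = "## " + section_header
--     new = "- " + bullet + "\n"
--     out = _seek(lines, target, new)
--     return content if out is None else "".join(out)
--
--
-- def _seek(lines, target, new):
--     """Recursively locate the section header; None if it never occurs."""
--     if not lines:
--         return None
--     head, rest = lines[0], lines[1:]
--     if head.strip() == target:
--         return [head] + _fill(rest, new)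
--     tail = _seek(rest, target, new)
--     return None if tail is None else [head] + tail
--
--
-- def _fill(lines, new):
--     """Split off the section body (up to the next '## ' heading) and place the bullet."""
--     body = []
--     while lines and not lines[0].startswith("## "):
--         body.append(lines[0])
--         lines = lines[1:]
--     return _place(body, new) + lines
--
--
-- def _place(body, new):
--     """Scan the body back to front: first bullet wins, else the last lone '-'."""
--     pl = None
--     for j in range(len(body) - 1, -1, -1):
--         s = body[j].strip()
--         if s.startswith("- "):
--             return body[: j + 1] + [new] + body[j + 1 :]
--         if s == "-" and pl is None:
--             pl = j
--     if pl is None: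
--         return [new] + body
--     return body[:pl] + [new] + body[pl + 1 :]
-- ===== Notes on version B (the rewrite author's own statement) =====
-- stated objective: alternative
-- what changed: Replaces A's three index-based scans plus in-place list mutation with a recursive descent that splits off the section body and a single back-to-front scan of the body that stops at the first bullet (else the last lone '-'), rebuilding the output by list concatenation.
import Mathlib
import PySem

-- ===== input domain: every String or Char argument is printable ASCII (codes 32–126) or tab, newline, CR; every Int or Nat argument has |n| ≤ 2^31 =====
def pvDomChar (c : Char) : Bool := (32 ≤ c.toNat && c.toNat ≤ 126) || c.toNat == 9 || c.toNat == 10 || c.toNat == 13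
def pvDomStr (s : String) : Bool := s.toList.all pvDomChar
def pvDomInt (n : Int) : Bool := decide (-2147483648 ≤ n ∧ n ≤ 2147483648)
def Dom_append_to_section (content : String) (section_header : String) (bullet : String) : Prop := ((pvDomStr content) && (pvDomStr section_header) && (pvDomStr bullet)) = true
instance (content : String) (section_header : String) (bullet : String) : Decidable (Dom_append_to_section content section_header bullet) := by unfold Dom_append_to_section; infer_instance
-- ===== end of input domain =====

-- B replaces A's three sequential index scans + in-place mutation by a recursive descent with one
-- back-to-front body scan (objective: alternative decomposition, same cost). Both ports share only
-- the splitlines(keepends=True) helper, exact for the '\n'/'\r'/'\r\n' breaks of the ASCII domain.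

-- length of the first line of cs INCLUDING its line break; exact for '\n', '\r', '\r\n'
def pvLineLen : List Char → Nat
  | [] => 0
  | '\r' :: '\n' :: _ => 2
  | '\r' :: _ => 1
  | '\n' :: _ => 1
  | _ :: rest => 1 + pvLineLen rest

theorem pvLineLen_pos : ∀ cs : List Char, cs ≠ [] → 0 < pvLineLen cs := by
  intro cs h
  fun_induction pvLineLen cs <;> simp_all [pvLineLen]

-- content.splitlines(keepends=True)
def pvSplitKeep (cs : List Char) : List (List Char) :=
  if h : cs = [] then []
  else cs.take (pvLineLen cs) :: pvSplitKeep (cs.drop (pvLineLen cs))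
termination_by cs.length
decreasing_by
  have := pvLineLen_pos cs h
  have hl : 0 < cs.length := List.length_pos_iff.mpr h
  simp
  omega

-- ===== PORT A =====
-- first index i with lines[i].strip() == target (the enumerate/break loop)
def aFindSec (target : List Char) : List (List Char) → Nat → Option Nat
  | [], _ => none
  | l :: rest, i => if PySem.Chars.strip l == target then some i else aFindSec target rest (i + 1)

-- for i in range(j, len(lines)): if lines[i].startswith("## "): return i; default len(lines)
def aFindEnd (lines : List (List Char)) (j : Nat) : Nat :=
  if h : j < lines.length then
    if PySem.Chars.startswith (lines.getD j []) ['#', '#', ' '] then j else aFindEnd lines (j + 1)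
  else lines.length
termination_by lines.length - j

-- the bullet/placeholder scan over range(section_idx+1, end_idx), carrying (last_bullet, placeholder)
def aScan (lines : List (List Char)) (j e : Nat) (lb pl : Option Nat) : Option Nat × Option Nat :=
  if _h : j < e then
    let s := PySem.Chars.strip (lines.getD j [])
    if s == ['-'] then aScan lines (j + 1) e lb (some j)
    else if PySem.Chars.startswith s ['-', ' '] then aScan lines (j + 1) e (some j) pl
    else aScan lines (j + 1) e lb pl
  else (lb, pl)
termination_by e - j

def append_to_section (content : String) (section_header : String) (bullet : String) : String :=
  let lines := pvSplitKeep content.toList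
  let target := '#' :: '#' :: ' ' :: section_header.toList
  match aFindSec target lines 0 with
  | none => content
  | some si =>
    let e := aFindEnd lines (si + 1)
    let r := aScan lines (si + 1) e none none
    let newl := '-' :: ' ' :: (bullet.toList ++ ['\n'])
    let lines' :=
      match r.2, r.1 with
      | some p, none => lines.set p newl
      | _, some lbi => lines.insertIdx (lbi + 1) newl
      | _, none => lines.insertIdx (si + 1) newl
    String.ofList lines'.flatten

-- ===== PORT B =====
-- the while loop of _fill: split off the body up to the next '## ' heading
def bSplit : List (List Char) → List (List Char) × List (List Char)
  | [] => ([], [])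
  | h :: t =>
    if PySem.Chars.startswith h ['#', '#', ' '] then ([], h :: t)
    else
      let (b, r) := bSplit t
      (h :: b, r)

-- the for j in range(len(body)-1, -1, -1) loop of _place; k = j+1 (k = 0 = loop exhausted)
def bPlaceGo (body : List (List Char)) (newl : List Char) : Nat → Option Nat → List (List Char)
  | 0, pl =>
    match pl with
    | none => newl :: body
    | some p => body.take p ++ newl :: body.drop (p + 1)
  | k + 1, pl =>
    let s := PySem.Chars.strip (body.getD k [])
    if PySem.Chars.startswith s ['-', ' '] then body.take (k + 1) ++ newl :: body.drop (k + 1)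
    else if s == ['-'] && pl == none then bPlaceGo body newl k (some k)
    else bPlaceGo body newl k pl

-- _seek: recursive descent locating the section header
def bSeek (target newl : List Char) : List (List Char) → Option (List (List Char))
  | [] => none
  | h :: t =>
    if PySem.Chars.strip h == target then
      some (h :: (let p := bSplit t; bPlaceGo p.1 newl p.1.length none ++ p.2))
    else
      match bSeek target newl t with
      | none => none
      | some tail => some (h :: tail)

def append_to_section_alt (content : String) (section_header : String) (bullet : String) : String :=
  let lines := pvSplitKeep content.toList
  let target := '#' :: '#' :: ' ' :: section_header.toList
  let newl := '-' :: ' ' :: (bullet.toList ++ ['\n'])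
  match bSeek target newl lines with
  | none => content
  | some out => String.ofList out.flatten

-- ===== PRECONDITION & SPEC =====
def Spec_append_to_section (content : String) (section_header : String) (bullet : String) (out : String) : Prop := out = append_to_section_alt content section_header bullet
instance (content : String) (section_header : String) (bullet : String) (out : String) : Decidable (Spec_append_to_section content section_header bullet out) := by unfold Spec_append_to_section; infer_instance

-- ===== CLAIM (what is proved, stated in full; the proofs are below) =====
def Claim_equal_append_to_section : Prop := ∀ (content : String) (section_header : String) (bullet : String), Dom_append_to_section content section_header bullet → Spec_append_to_section content section_header bullet (append_to_section content section_header bullet)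

-- ===== LEMMAS AND PROOFS =====

-- predicates shared by the correspondence proof
def nonE (l : List Char) : Bool := !PySem.Chars.startswith l ['#', '#', ' ']
def isBl (l : List Char) : Bool := PySem.Chars.startswith (PySem.Chars.strip l) ['-', ' ']
def isPl (l : List Char) : Bool := PySem.Chars.strip l == ['-']

-- last index of l satisfying p
def lastIdx? (p : List Char → Bool) : List (List Char) → Option Nat
  | [] => none
  | h :: t =>
    match lastIdx? p t with
    | some k => some (k + 1)
    | none => if p h then some 0 else none

-- the common "place the bullet into the body" result
def placeRef (newl : List Char) (body : List (List Char)) : List (List Char) :=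
  match lastIdx? isBl body with
  | some k => body.take (k + 1) ++ newl :: body.drop (k + 1)
  | none =>
    match lastIdx? isPl body with
    | some p => body.take p ++ newl :: body.drop (p + 1)
    | none => newl :: body

-- A's modification of the line list, given the section index
def aModify (newl : List Char) (lines : List (List Char)) (si : Nat) : List (List Char) :=
  match (aScan lines (si + 1) (aFindEnd lines (si + 1)) none none).2,
        (aScan lines (si + 1) (aFindEnd lines (si + 1)) none none).1 with
  | some p, none => lines.set p newl
  | _, some lbi => lines.insertIdx (lbi + 1) newl
  | _, none => lines.insertIdx (si + 1) newl

theorem isBl_eq_false_of_isPl (x : List Char) (h : isPl x = true) : isBl x = false := by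
  unfold isPl at h
  unfold isBl
  rw [beq_iff_eq.mp h]
  decide

theorem lastIdx?_lt (p : List Char → Bool) (l : List (List Char)) (k : Nat)
    (h : lastIdx? p l = some k) : k < l.length := by
  induction l generalizing k with
  | nil => simp [lastIdx?] at h
  | cons x t ih =>
    simp only [lastIdx?] at h
    cases ht : lastIdx? p t with
    | some m =>
      rw [ht] at h
      simp only [Option.some.injEq] at h
      have := ih m ht
      simp only [List.length_cons]
      omega
    | none =>
      rw [ht] at h
      by_cases hx : p x
      · rw [if_pos hx] at h
        simp only [Option.some.injEq] at h
        simp only [List.length_cons]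
        omega
      · rw [if_neg hx] at h
        exact absurd h (by simp)

theorem lastIdx?_append_singleton (p : List Char → Bool) (l : List (List Char)) (x : List Char) :
    lastIdx? p (l ++ [x]) = if p x then some l.length else lastIdx? p l := by
  induction l with
  | nil => simp [lastIdx?]
  | cons h t ih =>
    simp only [List.cons_append, lastIdx?, ih]
    by_cases hx : p x
    · rw [if_pos hx, if_pos hx]
      simp [lastIdx?]
    · rw [if_neg hx, if_neg hx]

theorem take_succ_eq (l : List (List Char)) (j : Nat) (h : j < l.length) :
    l.take (j + 1) = l.take j ++ [l[j]] := by
  rw [List.take_succ]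
  simp [List.getElem?_eq_getElem h]

theorem lastIdx?_take_succ (p : List Char → Bool) (l : List (List Char)) (j : Nat)
    (h : j < l.length) :
    lastIdx? p (l.take (j + 1)) = if p l[j] then some j else lastIdx? p (l.take j) := by
  rw [take_succ_eq l j h, lastIdx?_append_singleton]
  simp [Nat.min_eq_left (Nat.le_of_lt h)]

theorem insertIdx_eq_take_cons_drop (l : List (List Char)) (n : Nat) (x : List Char)
    (h : n ≤ l.length) : l.insertIdx n x = l.take n ++ x :: l.drop n := by
  induction l generalizing n with
  | nil => simp at h; simp [h]
  | cons y ys ih =>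
    cases n with
    | zero => simp
    | succ m => simp at h; simp [List.insertIdx_succ_cons, ih m h]

-- B's while loop is takeWhile/dropWhile
theorem bSplit_eq (t : List (List Char)) :
    bSplit t = (t.takeWhile nonE, t.dropWhile nonE) := by
  induction t with
  | nil => rfl
  | cons h rest ih =>
    simp only [bSplit, List.takeWhile, List.dropWhile, nonE, ih]
    by_cases hh : PySem.Chars.startswith h ['#', '#', ' '] <;> simp [hh]

-- invariant of B's back-to-front scan
theorem bPlaceGo_spec (body : List (List Char)) (newl : List Char) (j : Nat) (pl : Option Nat)
    (hj : j ≤ body.length)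
    (hnb : ∀ m, j ≤ m → m < body.length → isBl (body.getD m []) = false) :
    bPlaceGo body newl j pl =
      match lastIdx? isBl (body.take j) with
      | some k => body.take (k + 1) ++ newl :: body.drop (k + 1)
      | none =>
        match pl.or (lastIdx? isPl (body.take j)) with
        | some p => body.take p ++ newl :: body.drop (p + 1)
        | none => newl :: body := by
  induction j generalizing pl with
  | zero =>
    cases pl <;> simp [bPlaceGo, lastIdx?]
  | succ j ih =>
    have hjl : j < body.length := hj
    have hget : body.getD j [] = body[j] := List.getD_eq_getElem body [] hjl
    have eB : PySem.Chars.startswith (PySem.Chars.strip body[j]) ['-', ' '] = isBl body[j] := rfl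
    have eP : (PySem.Chars.strip body[j] == ['-']) = isPl body[j] := rfl
    simp only [bPlaceGo, hget, eB, eP]
    rw [lastIdx?_take_succ isBl body j hjl, lastIdx?_take_succ isPl body j hjl]
    cases hB : isBl body[j] with
    | true => simp
    | false =>
      have hprop : ∀ m, j ≤ m → m < body.length → isBl (body.getD m []) = false := by
        intro m hm1 hm2
        rcases Nat.eq_or_lt_of_le hm1 with h | h
        · rw [← h, hget]; exact hB
        · exact hnb m h hm2
      simp only [Bool.false_eq_true, if_false]
      cases hP : isPl body[j] with
      | false =>
        simp only [Bool.false_and, Bool.false_eq_true, if_false]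
        exact ih pl (Nat.le_of_lt hjl) hprop
      | true =>
        simp only [Bool.true_and, Bool.false_eq_true, if_false]
        cases pl with
        | none =>
          simp only [BEq.rfl, if_pos rfl]
          rw [ih (some j) (Nat.le_of_lt hjl) hprop]
          cases lastIdx? isBl (body.take j) <;> simp [Option.or]
        | some q =>
          simp only [reduceCtorEq, beq_iff_eq, if_false]
          rw [ih (some q) (Nat.le_of_lt hjl) hprop]
          cases lastIdx? isBl (body.take j) <;> simp [Option.or]

theorem bPlace_eq (body : List (List Char)) (newl : List Char) :
    bPlaceGo body newl body.length none = placeRef newl body := by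
  rw [bPlaceGo_spec body newl body.length none (Nat.le_refl _)
      (fun m hm1 hm2 => absurd hm2 (by omega))]
  simp [placeRef, Option.or]

-- index shift lemmas for A's helpers
theorem aFindEnd_cons (h : List Char) (t : List (List Char)) (j : Nat) :
    aFindEnd (h :: t) (j + 1) = aFindEnd t j + 1 := by
  conv_lhs => rw [aFindEnd]
  conv_rhs => rw [aFindEnd]
  by_cases hj : j < t.length
  · rw [dif_pos (by simp; omega), dif_pos hj]
    simp only [List.getD_cons_succ]
    by_cases hs : PySem.Chars.startswith (t.getD j []) ['#', '#', ' ']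
    · rw [if_pos hs, if_pos hs]
    · rw [if_neg hs, if_neg hs]
      exact aFindEnd_cons h t (j + 1)
  · rw [dif_neg (by simp; omega), dif_neg hj]
    simp
termination_by t.length - j

theorem aFindEnd_zero (t : List (List Char)) :
    aFindEnd t 0 = (t.takeWhile nonE).length := by
  induction t with
  | nil => rw [aFindEnd]; simp
  | cons h rest ih =>
    conv_lhs => rw [aFindEnd]
    rw [dif_pos (by simp)]
    simp only [List.getD_cons_zero, List.takeWhile]
    by_cases hh : PySem.Chars.startswith h ['#', '#', ' ']
    · simp [hh, nonE]
    · rw [if_neg hh]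
      rw [show (0 : Nat) + 1 = 0 + 1 from rfl, aFindEnd_cons, ih]
      simp [nonE, hh]

theorem aScan_cons (h : List Char) (t : List (List Char)) (j e : Nat) (lb pl : Option Nat) :
    aScan (h :: t) (j + 1) (e + 1) (lb.map (· + 1)) (pl.map (· + 1)) =
      ((aScan t j e lb pl).1.map (· + 1), (aScan t j e lb pl).2.map (· + 1)) := by
  by_cases hj : j < e
  · conv_lhs => rw [aScan]
    conv_rhs => rw [aScan]
    rw [dif_pos (by omega), dif_pos hj]
    simp only [List.getD_cons_succ]
    by_cases hP : (PySem.Chars.strip (t.getD j []) == ['-']) = true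
    · rw [if_pos hP, if_pos hP]
      have := aScan_cons h t (j + 1) e lb (some j)
      simpa using this
    · rw [if_neg hP, if_neg hP]
      by_cases hB : PySem.Chars.startswith (PySem.Chars.strip (t.getD j [])) ['-', ' '] = true
      · rw [if_pos hB, if_pos hB]
        have := aScan_cons h t (j + 1) e (some j) pl
        simpa using this
      · rw [if_neg hB, if_neg hB]
        exact aScan_cons h t (j + 1) e lb pl
  · conv_lhs => rw [aScan]
    conv_rhs => rw [aScan]
    rw [dif_neg (by omega), dif_neg hj]
termination_by e - j

-- A's scan computes the last bullet / placeholder index of the scanned region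
theorem aScan_spec (l : List (List Char)) (j e : Nat) (lb pl : Option Nat)
    (h1 : j ≤ e) (h2 : e ≤ l.length) :
    aScan l j e lb pl =
      (((lastIdx? isBl ((l.drop j).take (e - j))).map (j + ·)).or lb,
       ((lastIdx? isPl ((l.drop j).take (e - j))).map (j + ·)).or pl) := by
  by_cases hj : j < e
  · have hjl : j < l.length := by omega
    have hreg : (l.drop j).take (e - j) = l[j] :: (l.drop (j + 1)).take (e - (j + 1)) := by
      have hm : e - j = (e - (j + 1)) + 1 := by omega
      rw [hm]
      conv_lhs => rw [List.drop_eq_getElem_cons hjl]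
      rw [List.take_succ_cons]
    conv_lhs => rw [aScan]
    rw [dif_pos hj]
    have hget : l.getD j [] = l[j] := List.getD_eq_getElem l [] hjl
    have eB : PySem.Chars.startswith (PySem.Chars.strip l[j]) ['-', ' '] = isBl l[j] := rfl
    have eP : (PySem.Chars.strip l[j] == ['-']) = isPl l[j] := rfl
    simp only [hget, eB, eP]
    rw [hreg]
    simp only [lastIdx?]
    have ih := fun lb pl => aScan_spec l (j + 1) e lb pl (by omega) h2
    cases hP : isPl l[j] with
    | true =>
      have hB := isBl_eq_false_of_isPl _ hP
      rw [if_pos rfl, ih lb (some j)]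
      rw [hB]
      simp only [Prod.mk.injEq]
      constructor
      · cases lastIdx? isBl ((l.drop (j + 1)).take (e - (j + 1))) <;>
          simp [Option.or] <;> omega
      · cases lastIdx? isPl ((l.drop (j + 1)).take (e - (j + 1))) <;>
          simp [Option.or] <;> omega
    | false =>
      rw [if_neg (by simp)]
      cases hB : isBl l[j] with
      | true =>
        rw [if_pos rfl, ih (some j) pl]
        simp only [Prod.mk.injEq]
        constructor
        · cases lastIdx? isBl ((l.drop (j + 1)).take (e - (j + 1))) <;>
            simp [Option.or] <;> omega
        · cases lastIdx? isPl ((l.drop (j + 1)).take (e - (j + 1))) <;>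
            simp [Option.or] <;> omega
      | false =>
        rw [if_neg (by simp), ih lb pl]
        simp only [Prod.mk.injEq]
        constructor
        · cases lastIdx? isBl ((l.drop (j + 1)).take (e - (j + 1))) <;>
            simp [Option.or] <;> omega
        · cases lastIdx? isPl ((l.drop (j + 1)).take (e - (j + 1))) <;>
            simp [Option.or] <;> omega
  · have : j = e := by omega
    subst this
    conv_lhs => rw [aScan]
    rw [dif_neg (by omega)]
    simp [lastIdx?, Option.or]
termination_by e - j

theorem aModify_zero (newl h : List Char) (t : List (List Char)) :
    aModify newl (h :: t) 0 =
      h :: (placeRef newl (t.takeWhile nonE) ++ t.dropWhile nonE) := by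
  have hbl : (t.takeWhile nonE).length ≤ t.length := (List.takeWhile_prefix nonE).length_le
  have hbody : t.take (t.takeWhile nonE).length = t.takeWhile nonE :=
    (List.prefix_iff_eq_take.mp (List.takeWhile_prefix nonE)).symm
  have hsplit : t.takeWhile nonE ++ t.dropWhile nonE = t := List.takeWhile_append_dropWhile
  have he : aFindEnd (h :: t) 1 = (t.takeWhile nonE).length + 1 := by
    rw [show (1 : Nat) = 0 + 1 from rfl, aFindEnd_cons, aFindEnd_zero]
  have hsc : aScan (h :: t) 1 ((t.takeWhile nonE).length + 1) none none =
      ((lastIdx? isBl (t.takeWhile nonE)).map (· + 1),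
       (lastIdx? isPl (t.takeWhile nonE)).map (· + 1)) := by
    have h0 := aScan_cons h t 0 (t.takeWhile nonE).length none none
    simp only [Option.map_none] at h0
    rw [h0, aScan_spec t 0 (t.takeWhile nonE).length none none (Nat.zero_le _) hbl]
    simp only [List.drop_zero, Nat.sub_zero, hbody, Option.or_none]
    simp only [Prod.mk.injEq]
    constructor
    · cases lastIdx? isBl (t.takeWhile nonE) <;> simp
    · cases lastIdx? isPl (t.takeWhile nonE) <;> simp
  unfold aModify
  simp only [Nat.zero_add]
  rw [he, hsc]
  set body := t.takeWhile nonE with hbdef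
  set rest := t.dropWhile nonE with hrdef
  cases hB : lastIdx? isBl body with
  | some k =>
    have hk : k < body.length := lastIdx?_lt _ _ _ hB
    cases hP : lastIdx? isPl body with
    | some p =>
      simp only [Option.map_some, List.insertIdx_succ_cons]
      rw [insertIdx_eq_take_cons_drop t (k + 1) newl (by omega)]
      rw [placeRef, hB]
      rw [← hsplit, List.take_append, List.drop_append]
      have h0 : k + 1 - body.length = 0 := by omega
      simp [h0]
    | none =>
      simp only [Option.map_some, Option.map_none, List.insertIdx_succ_cons]
      rw [insertIdx_eq_take_cons_drop t (k + 1) newl (by omega)]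
      rw [placeRef, hB]
      rw [← hsplit, List.take_append, List.drop_append]
      have h0 : k + 1 - body.length = 0 := by omega
      simp [h0]
  | none =>
    cases hP : lastIdx? isPl body with
    | some p =>
      have hp : p < body.length := lastIdx?_lt _ _ _ hP
      simp only [Option.map_some, Option.map_none, List.set_cons_succ]
      rw [placeRef, hB, hP]
      rw [← hsplit, List.set_append_left _ _ (by omega)]
      rw [List.set_eq_take_cons_drop newl hp]
    | none =>
      simp only [Option.map_none, List.insertIdx_succ_cons]
      rw [placeRef, hB, hP]
      rw [← hsplit]
      simp

theorem aModify_cons (newl h : List Char) (t : List (List Char)) (sj : Nat) :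
    aModify newl (h :: t) (sj + 1) = h :: aModify newl t sj := by
  unfold aModify
  rw [aFindEnd_cons]
  have hsc := aScan_cons h t (sj + 1) (aFindEnd t (sj + 1)) none none
  simp only [Option.map_none] at hsc
  rw [hsc]
  cases h2 : (aScan t (sj + 1) (aFindEnd t (sj + 1)) none none).2 with
  | some p =>
    cases h1 : (aScan t (sj + 1) (aFindEnd t (sj + 1)) none none).1 with
    | some lbi => simp only [Option.map_some, List.insertIdx_succ_cons]
    | none => simp only [Option.map_some, Option.map_none, List.set_cons_succ]
  | none =>
    cases h1 : (aScan t (sj + 1) (aFindEnd t (sj + 1)) none none).1 with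
    | some lbi => simp only [Option.map_some, Option.map_none, List.insertIdx_succ_cons]
    | none => simp only [Option.map_none, List.insertIdx_succ_cons]

theorem aFindSec_shift (target : List Char) (l : List (List Char)) (i : Nat) :
    aFindSec target l (i + 1) = (aFindSec target l i).map (· + 1) := by
  induction l generalizing i with
  | nil => rfl
  | cons h t ih =>
    simp only [aFindSec]
    split
    · rfl
    · exact ih (i + 1)

theorem main_corr (target newl : List Char) (lines : List (List Char)) :
    bSeek target newl lines = (aFindSec target lines 0).map (aModify newl lines) := by
  induction lines with
  | nil => rfl
  | cons h t ih =>
    simp only [bSeek, aFindSec]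
    by_cases hH : (PySem.Chars.strip h == target) = true
    · rw [if_pos hH, if_pos hH]
      simp only [Option.map_some]
      rw [aModify_zero, bSplit_eq]
      rw [bPlace_eq]
    · rw [if_neg hH, if_neg hH]
      rw [show (0 : Nat) + 1 = 0 + 1 from rfl, aFindSec_shift]
      rw [ih]
      cases hA : aFindSec target t 0 with
      | none => simp
      | some sj =>
        simp only [Option.map_some]
        rw [aModify_cons]

-- ===== VERDICT (by name: the statement is the Claim_ definition above) =====
theorem append_to_section_spec : Claim_equal_append_to_section := by
  intro content section_header bullet _
  unfold Spec_append_to_section append_to_section append_to_section_alt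
  have h := main_corr ('#' :: '#' :: ' ' :: section_header.toList)
      ('-' :: ' ' :: (bullet.toList ++ ['\n'])) (pvSplitKeep content.toList)
  simp only [h]
  cases hA : aFindSec ('#' :: '#' :: ' ' :: section_header.toList) (pvSplitKeep content.toList) 0 with
  | none => simp
  | some si =>
    simp only [Option.map_some]
    rfl
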